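-- pv_equiv track=rewrite | github.com/bitwisecook/tcl-lsp | core/minifier/static_substr.py | _parse_var_ref
-- ===== SOURCE A (Python) =====
-- def _parse_var_ref(text: str, pos: int) -> tuple[int, str | None]:
--     """Parse a $var or ${var} reference starting at *pos*.
--
--     Returns ``(end_pos, var_name)`` or ``(pos+1, None)`` on failure.
--     """
--     if pos >= len(text) or text[pos] != "$":
--         return pos + 1, None
--
--     start = pos + 1
--     if start >= len(text):
--         return start, None
--
--     if text[start] == "{":
--         # ${varname}
--         close = text.find("}", start + 1)
--         if close < 0:
--             return start, None
--         return close + 1, text[start + 1 : close]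
--
--     # $varname — word characters only.
--     end = start
--     while end < len(text) and (text[end].isalnum() or text[end] == "_"):
--         end += 1
--     if end == start:
--         return start, None
--     # Reject array element forms ($arr(idx)) — we cannot safely fold these.
--     # Also reject namespace-qualified forms ($ns::var) — detected by `::` after the name.
--     if end < len(text):
--         if text[end] == "(":
--             return start, None
--         if text[end] == ":" and end + 1 < len(text) and text[end + 1] == ":":
--             return start, None
--     return end, text[start:end]
-- ===== SOURCE B (Python) =====
-- import re
--
-- _BRACED = re.compile(r"\$\{([^}]*)\}")
-- _BARE = re.compile(r"\$([A-Za-z0-9_]+)")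
--
--
-- def _parse_var_ref(text: str, pos: int) -> tuple[int, str | None]:
--     """Parse a $var or ${var} reference starting at *pos* (regex-based)."""
--     if 0 <= pos < len(text) and text[pos] == "$":
--         m = _BRACED.match(text, pos)
--         if m:
--             return m.end(), m.group(1)
--         m = _BARE.match(text, pos)
--         if m:
--             end = m.end()
--             if text[end:end + 1] != "(" and text[end:end + 2] != "::":
--                 return end, m.group(1)
--     return pos + 1, None
-- ===== Notes on version B (the rewrite author's own statement) =====
-- stated objective: idiomatic
-- what changed: B replaces A's manual character-by-character scanning (find, index tests, a while-loop over word chars) with two anchored compiled regexes (\$\{([^}]*)\} and \$([A-Za-z0-9_]+)) plus a single bounds-and-'$' guard, folding A's several failure returns into one (pos+1, None) exit.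
-- intended difference: On in-range negative pos where Python's negative-index wraparound lets A see a '$' and successfully parse a wrapped variable reference, A returns an accidental (end, name); B treats pos as an absolute position, rejects negative pos and returns (pos+1, None), the intended failure value. — e.g. on _parse_var_ref("$a", -2): A returns (0, some ""), B returns (-1, none)
import Mathlib
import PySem

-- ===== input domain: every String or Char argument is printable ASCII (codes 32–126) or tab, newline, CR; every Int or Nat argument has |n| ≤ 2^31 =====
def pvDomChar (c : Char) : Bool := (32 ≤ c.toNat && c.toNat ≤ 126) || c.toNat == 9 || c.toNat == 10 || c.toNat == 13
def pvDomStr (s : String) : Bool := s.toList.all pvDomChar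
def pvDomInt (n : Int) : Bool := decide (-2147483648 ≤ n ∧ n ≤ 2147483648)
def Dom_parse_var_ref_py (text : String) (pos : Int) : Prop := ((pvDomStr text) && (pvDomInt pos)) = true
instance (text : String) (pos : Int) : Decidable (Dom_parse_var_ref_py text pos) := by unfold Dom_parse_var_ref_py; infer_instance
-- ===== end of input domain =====

-- B re-implements the scanner with two anchored regexes ('\$\{([^}]*)\}' / '\$([A-Za-z0-9_]+)') instead of A's
-- manual char-by-char scan (objective: idiomatic); equivalence is about return values; neither mutates anything.

-- ===== PORT A =====
-- Python's `text[end].isalnum() or text[end] == "_"`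
def pvIsWord (c : Char) : Bool := PySem.Chars.isalnum c || c == '_'

-- the `while end < len(text) and (text[end].isalnum() or text[end] == "_"): end += 1` loop of A;
-- the fuel argument only makes the recursion structural: pvScanA passes enough fuel for the whole loop
def pvScanGo (s : List Char) : Nat → Int → Int
  | 0, e => e
  | fuel + 1, e =>
    if e < (s.length : Int) then
      match PySem.List.pyGet? s e with
      | some c => if pvIsWord c then pvScanGo s fuel (e + 1) else e
      | none => e   -- Python would raise here (index < -len); unreachable from A's call sites under Pre_
    else e

def pvScanA (s : List Char) (e : Int) : Int := pvScanGo s ((s.length : Int) - e).toNat e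

def parse_var_ref_py (text : String) (pos : Int) : Int × Option String :=
  let s := text.toList
  let n : Int := s.length
  if pos ≥ n then (pos + 1, none) else
  match PySem.List.pyGet? s pos with
  | none => (pos + 1, none)   -- Python raises IndexError here (pos < -len); excluded by Pre_
  | some c0 =>
    if c0 ≠ '$' then (pos + 1, none) else
    let start := pos + 1
    if start ≥ n then (start, none) else
    match PySem.List.pyGet? s start with
    | none => (start, none)   -- unreachable under Pre_ (start is then in range)
    | some c1 =>
      if c1 = '{' then
        let close := PySem.Chars.findFrom s ['}'] (start + 1)
        if close < 0 then (start, none)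
        else (close + 1, some (String.ofList (PySem.List.slice s (some (start + 1)) (some close))))
      else
        let e := pvScanA s start
        if e = start then (start, none)
        else if e < n ∧ PySem.List.pyGet? s e = some '(' then (start, none)
        else if e < n ∧ PySem.List.pyGet? s e = some ':' ∧ e + 1 < n ∧ PySem.List.pyGet? s (e + 1) = some ':'
          then (start, none)
        else (e, some (String.ofList (PySem.List.slice s (some start) (some e))))

-- ===== PORT B =====
-- the regex character class [A-Za-z0-9_]
def pvAsciiWord (c : Char) : Bool :=
  ('a' ≤ c && c ≤ 'z') || ('A' ≤ c && c ≤ 'Z') || ('0' ≤ c && c ≤ '9') || c == '_'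

-- hand-ported model of `_BRACED.match(text, p)` for the fixed pattern r"\$\{([^}]*)\}": exact for this
-- pattern — '$','{', a maximal run of non-'}' (the group), then a required '}'; returns (m.end(), group).
def pvBracedMatch (s : List Char) (p : Nat) : Option (Nat × List Char) :=
  if (s.drop p).take 2 = ['$', '{'] then
    let rest := s.drop (p + 2)
    let inner := rest.takeWhile (fun c => c != '}')
    if inner.length < rest.length then some (p + 2 + inner.length + 1, inner) else none
  else none

-- hand-ported model of `_BARE.match(text, p)` for the fixed pattern r"\$([A-Za-z0-9_]+)": exact for this
-- pattern — '$' then a maximal nonempty run of word chars (the group); returns (m.end(), group).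
def pvBareMatch (s : List Char) (p : Nat) : Option (Nat × List Char) :=
  if (s.drop p).take 1 = ['$'] then
    let name := (s.drop (p + 1)).takeWhile pvAsciiWord
    if name.length = 0 then none else some (p + 1 + name.length, name)
  else none

def parse_var_ref_py_alt (text : String) (pos : Int) : Int × Option String :=
  let s := text.toList
  if 0 ≤ pos ∧ pos < (s.length : Int) ∧ PySem.List.pyGet? s pos = some '$' then
    match pvBracedMatch s pos.toNat with
    | some (e, g) => ((e : Int), some (String.ofList g))
    | none =>
      match pvBareMatch s pos.toNat with
      | some (e, g) =>
        if PySem.List.slice s (some (e : Int)) (some ((e : Int) + 1)) ≠ ['('] ∧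
           PySem.List.slice s (some (e : Int)) (some ((e : Int) + 2)) ≠ [':', ':'] then
          ((e : Int), some (String.ofList g))
        else (pos + 1, none)
      | none => (pos + 1, none)
  else (pos + 1, none)

-- ===== PRECONDITION & SPEC =====
-- Pre_ excludes exactly pos < -len(text), where A raises IndexError on `text[pos]`.
def Pre_parse_var_ref_py (text : String) (pos : Int) : Prop :=
  -(text.toList.length : Int) ≤ pos
instance (text : String) (pos : Int) : Decidable (Pre_parse_var_ref_py text pos) := by
  unfold Pre_parse_var_ref_py; infer_instance

def pvWitness_parse_var_ref_py : String × Int := ("$x", 0)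

-- pvWrap text pos: the text as Python's negative indexing sees it from position pos+1 on
-- (the wrapped tail, then — because A's scan loop runs `end` past -1 into 0 — the whole text again)
def pvWrap (text : String) (pos : Int) : List Char :=
  text.toList.drop ((text.toList.length : Int) + pos + 1).toNat ++ text.toList

-- pvRun text pos: length of the word-character run the wrapped text starts with
def pvRun (text : String) (pos : Int) : Nat :=
  ((pvWrap text pos).takeWhile (fun c => c.isAlphanum || c == '_')).length

-- On negative pos where Python's wraparound makes A see '$' and then a parsable reference (a nonempty
-- wrapped word run not followed by '(' or '::', or '{' with a later '}'), A returns an accidental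
-- (end, name); B treats pos as absolute, rejects it and returns (pos+1, None), the intended failure.
def D_parse_var_ref_py (text : String) (pos : Int) : Prop :=
  pos < 0 ∧ PySem.List.pyGet? text.toList pos = some '$' ∧
  ((0 < pvRun text pos ∧
    ((pvWrap text pos).drop (pvRun text pos)).take 1 ≠ ['('] ∧
    ((pvWrap text pos).drop (pvRun text pos)).take 2 ≠ [':', ':']) ∨
   (PySem.List.pyGet? text.toList (pos + 1) = some '{' ∧
    PySem.Chars.findFrom text.toList ['}'] (pos + 2) ≠ -1))
instance (text : String) (pos : Int) : Decidable (D_parse_var_ref_py text pos) := by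
  unfold D_parse_var_ref_py; infer_instance

def Spec_parse_var_ref_py (text : String) (pos : Int) (out : Int × Option String) : Prop :=
  ¬ D_parse_var_ref_py text pos → out = parse_var_ref_py_alt text pos
instance (text : String) (pos : Int) (out : Int × Option String) : Decidable (Spec_parse_var_ref_py text pos out) := by
  unfold Spec_parse_var_ref_py; infer_instance

def pvDiffWitness_parse_var_ref_py : String × Int := ("$a", -2)
def pvDiffWitnessOut_parse_var_ref_py : (Int × Option String) × (Int × Option String) :=
  ((0, some ""), (-1, none))

-- ===== CLAIM (what is proved, stated in full; the proofs are below) =====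
def Claim_unchanged_parse_var_ref_py : Prop := ∀ (text : String) (pos : Int), Dom_parse_var_ref_py text pos → Pre_parse_var_ref_py text pos → Spec_parse_var_ref_py text pos (parse_var_ref_py text pos)
def Claim_changed_parse_var_ref_py : Prop := Dom_parse_var_ref_py (pvDiffWitness_parse_var_ref_py.1) (pvDiffWitness_parse_var_ref_py.2) ∧ Pre_parse_var_ref_py (pvDiffWitness_parse_var_ref_py.1) (pvDiffWitness_parse_var_ref_py.2) ∧ D_parse_var_ref_py (pvDiffWitness_parse_var_ref_py.1) (pvDiffWitness_parse_var_ref_py.2) ∧ parse_var_ref_py (pvDiffWitness_parse_var_ref_py.1) (pvDiffWitness_parse_var_ref_py.2) = pvDiffWitnessOut_parse_var_ref_py.1 ∧ parse_var_ref_py_alt (pvDiffWitness_parse_var_ref_py.1) (pvDiffWitness_parse_var_ref_py.2) = pvDiffWitnessOut_parse_var_ref_py.2 ∧ pvDiffWitnessOut_parse_var_ref_py.1 ≠ pvDiffWitnessOut_parse_var_ref_py.2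
def Claim_exact_parse_var_ref_py : Prop := ∀ (text : String) (pos : Int), Dom_parse_var_ref_py text pos → Pre_parse_var_ref_py text pos → D_parse_var_ref_py text pos → parse_var_ref_py text pos ≠ parse_var_ref_py_alt text pos

-- ===== LEMMAS AND PROOFS =====

-- A's char test and B's regex class agree on the ASCII domain
set_option maxRecDepth 10000 in
lemma pv_word_ascii (c : Char) (h : pvDomChar c = true) : pvIsWord c = pvAsciiWord c := by
  have h2 : c.toNat < 128 := by
    simp only [pvDomChar, Bool.or_eq_true, Bool.and_eq_true, decide_eq_true_eq, beq_iff_eq] at h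
    omega
  have key : ∀ n ∈ List.range 128, pvIsWord (Char.ofNat n) = pvAsciiWord (Char.ofNat n) := by decide
  have := key c.toNat (List.mem_range.mpr h2)
  rwa [Char.ofNat_toNat] at this

-- A's char test and D_'s char test agree on the ASCII domain
set_option maxRecDepth 10000 in
lemma pv_word_dom (c : Char) (h : pvDomChar c = true) :
    pvIsWord c = (c.isAlphanum || c == '_') := by
  have h2 : c.toNat < 128 := by
    simp only [pvDomChar, Bool.or_eq_true, Bool.and_eq_true, decide_eq_true_eq, beq_iff_eq] at h
    omega
  have key : ∀ n ∈ List.range 128,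
      pvIsWord (Char.ofNat n) = ((Char.ofNat n).isAlphanum || Char.ofNat n == '_') := by decide
  have := key c.toNat (List.mem_range.mpr h2)
  rwa [Char.ofNat_toNat] at this

lemma pv_tw_congr (p q : Char → Bool) (l : List Char) (h : ∀ c ∈ l, p c = q c) :
    l.takeWhile p = l.takeWhile q := by
  induction l with
  | nil => rfl
  | cons a l ih =>
    rw [List.takeWhile_cons, List.takeWhile_cons, h a List.mem_cons_self]
    by_cases hq : q a = true
    · simp only [hq, if_true, ih (fun c hc => h c (List.mem_cons_of_mem a hc))]
    · simp [hq]

lemma pv_tw_cons_neg (a : Char) (r : List Char) (ha : ¬ a = '}') :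
    (a :: r).takeWhile (fun c => c != '}') = a :: r.takeWhile (fun c => c != '}') := by
  simp [List.takeWhile_cons, ha]

lemma pv_tw_cons_pos (r : List Char) :
    ('}' :: r).takeWhile (fun c => c != '}') = [] := by
  simp [List.takeWhile_cons]

lemma pv_tw_lt_iff (r : List Char) :
    (r.takeWhile (fun c => c != '}')).length < r.length ↔ ('}' : Char) ∈ r := by
  induction r with
  | nil => simp
  | cons a r ih =>
    by_cases ha : a = '}'
    · subst ha; simp [pv_tw_cons_pos]
    · rw [pv_tw_cons_neg a r ha]
      simp only [List.length_cons, List.mem_cons, Nat.add_lt_add_iff_right, ih]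
      constructor
      · exact Or.inr
      · rintro (h | h)
        · exact absurd h.symm ha
        · exact h

lemma pv_tw_spec (r : List Char) (h : ('}' : Char) ∈ r) :
    ['}'] <+: r.drop (r.takeWhile (fun c => c != '}')).length ∧
    ∀ i < (r.takeWhile (fun c => c != '}')).length, ¬ ['}'] <+: r.drop i := by
  induction r with
  | nil => simp at h
  | cons a r ih =>
    by_cases ha : a = '}'
    · subst ha
      refine ⟨?_, ?_⟩
      · simp [pv_tw_cons_pos]
      · simp [pv_tw_cons_pos]
    · rcases List.mem_cons.mp h with h1 | h2
      · exact absurd h1.symm ha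
      · obtain ⟨hp, hmin⟩ := ih h2
        rw [pv_tw_cons_neg a r ha]
        refine ⟨?_, ?_⟩
        · simpa using hp
        · intro i hi
          match i with
          | 0 =>
            intro hpre
            have : ('}' : Char) = a := by simpa using hpre
            exact ha this.symm
          | i + 1 =>
            simp only [List.drop_succ_cons]
            exact hmin i (by simpa using hi)

lemma pv_find_brace (r : List Char) :
    PySem.Chars.find r ['}'] =
      if ('}' : Char) ∈ r then ((r.takeWhile (fun c => c != '}')).length : Int) else -1 := by
  by_cases hm : ('}' : Char) ∈ r
  · simp only [hm, if_true]
    obtain ⟨l1, l2, rfl⟩ := List.append_of_mem hm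
    set r := l1 ++ '}' :: l2 with hr
    have hinf : ['}'] <:+: r := ⟨l1, l2, by simp [hr]⟩
    have h0 : 0 ≤ PySem.Chars.find r ['}'] := (PySem.Chars.find_nonneg_iff r ['}']).mpr hinf
    obtain ⟨hp, hmin⟩ := PySem.Chars.find_spec h0
    have hm' : ('}' : Char) ∈ r := by simp [hr]
    obtain ⟨htw, htwmin⟩ := pv_tw_spec r hm'
    have heq : (PySem.Chars.find r ['}']).toNat = (r.takeWhile (fun c => c != '}')).length := by
      rcases lt_trichotomy (PySem.Chars.find r ['}']).toNat (r.takeWhile (fun c => c != '}')).length with hlt | he | hgt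
      · exact absurd hp (htwmin _ hlt)
      · exact he
      · exact absurd htw (hmin _ hgt)
    omega
  · simp only [hm, if_false]
    refine (PySem.Chars.find_eq_neg_one_iff r ['}']).mpr ?_
    intro hinf
    exact hm (List.singleton_sublist.mp hinf.sublist)

lemma pv_scan_go (s : List Char) (fuel k : Nat) (hk : k ≤ s.length) (hf : s.length - k ≤ fuel) :
    pvScanGo s fuel (k : Int) = (k : Int) + ((s.drop k).takeWhile pvIsWord).length := by
  induction fuel generalizing k with
  | zero =>
    have : k = s.length := by omega
    subst this
    simp [pvScanGo]
  | succ f ih =>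
    by_cases hlt : k < s.length
    · have hget : PySem.List.pyGet? s (k : Int) = some s[k] := by
        rw [PySem.List.pyGet?_natCast]; simp [hlt]
      rw [pvScanGo]
      rw [if_pos (by exact_mod_cast hlt), hget]
      rw [List.drop_eq_getElem_cons hlt, List.takeWhile_cons]
      by_cases hw : pvIsWord s[k]
      · simp only [hw, if_true]
        have : (k : Int) + 1 = ((k + 1 : Nat) : Int) := by push_cast; ring
        rw [this, ih (k + 1) (by omega) (by omega), List.length_cons]
        push_cast; ring
      · simp [hw]
    · have : k = s.length := by omega
      subst this
      rw [pvScanGo, if_neg (by omega)]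
      simp

lemma pv_scanA (s : List Char) (k : Nat) (hk : k ≤ s.length) :
    pvScanA s (k : Int) = (k : Int) + ((s.drop k).takeWhile pvIsWord).length := by
  unfold pvScanA
  have : (((s.length : Int) - (k : Int)).toNat) = s.length - k := by omega
  rw [this]
  exact pv_scan_go s (s.length - k) k hk (by omega)

lemma pv_tw_take {α : Type} (p : α → Bool) (l : List α) :
    l.take (l.takeWhile p).length = l.takeWhile p :=
  (List.prefix_iff_eq_take.mp (List.takeWhile_prefix p)).symm

lemma pv_pyGet_neg (s : List Char) (i : Int) (h1 : -(s.length : Int) ≤ i) (h2 : i < 0)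
    (hidx : s.length - (-i).toNat < s.length) :
    PySem.List.pyGet? s i = some (s[s.length - (-i).toNat]'hidx) := by
  simp [PySem.List.pyGet?, PySem.List.pyIdx?, not_le.mpr h2, h1, List.getElem?_eq_getElem hidx]

lemma pv_findFrom_cases (s sub : List Char) (x : Int) :
    PySem.Chars.findFrom s sub x = -1 ∨ 0 ≤ PySem.Chars.findFrom s sub x := by
  simp only [PySem.Chars.findFrom]
  have hst : (0 : Int) ≤ if x < 0 then (if x + (s.length : Int) < 0 then 0 else x + s.length) else x := by
    split_ifs <;> omega
  generalize hG : (if x < 0 then (if x + (s.length : Int) < 0 then 0 else x + s.length) else x) = st at *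
  split_ifs with h1 h2
  · exact Or.inl rfl
  · exact Or.inl rfl
  · right
    have hf := PySem.Chars.neg_one_le_find
      (List.drop st.toNat (List.take ((s.length : Int)).toNat s)) sub
    omega

lemma pv_findFrom_nonneg (s sub : List Char) (x : Int)
    (h : PySem.Chars.findFrom s sub x ≠ -1) : 0 ≤ PySem.Chars.findFrom s sub x := by
  rcases pv_findFrom_cases s sub x with h1 | h1
  · exact absurd h1 h
  · exact h1

lemma pv_scan_neg (s : List Char) (j : Nat) (hj : j ≤ s.length) (hn : 0 < s.length) :
    pvScanA s (-(j : Int)) =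
      -(j : Int) + ((((s.drop (s.length - j)) ++ s).takeWhile pvIsWord).length : Int) := by
  induction j with
  | zero =>
    have h0 := pv_scanA s 0 (by omega)
    simpa using h0
  | succ j ih =>
    unfold pvScanA
    rw [(show (((s.length : Int)) - (-(((j + 1 : Nat)) : Int))).toNat = (s.length + j) + 1 by
      push_cast; omega)]
    rw [pvScanGo]
    rw [if_pos (show -(((j + 1 : Nat)) : Int) < (s.length : Int) by push_cast; omega)]
    have hidx : s.length - (j + 1) < s.length := by omega
    have hget : PySem.List.pyGet? s (-(((j + 1 : Nat)) : Int)) = some (s[s.length - (j + 1)]'hidx) := by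
      have := pv_pyGet_neg s (-(((j + 1 : Nat)) : Int)) (by push_cast; omega) (by push_cast; omega)
        (by simpa using hidx)
      simpa using this
    simp only [hget]
    have hdrop : s.drop (s.length - (j + 1)) = s[s.length - (j + 1)]'hidx :: s.drop (s.length - j) := by
      rw [List.drop_eq_getElem_cons hidx]
      congr 2
      omega
    by_cases hw : pvIsWord (s[s.length - (j + 1)]'hidx) = true
    · rw [if_pos hw]
      have hstep : pvScanGo s (s.length + j) (-(((j + 1 : Nat)) : Int) + 1) = pvScanA s (-(j : Int)) := by
        rw [(show -(((j + 1 : Nat)) : Int) + 1 = -(j : Int) by push_cast; ring)]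
        unfold pvScanA
        rw [(show (((s.length : Int)) - (-(j : Int))).toNat = s.length + j by push_cast; omega)]
      rw [hstep, ih (by omega)]
      rw [hdrop, List.cons_append, List.takeWhile_cons, if_pos hw, List.length_cons]
      push_cast; ring
    · rw [if_neg hw]
      rw [hdrop, List.cons_append, List.takeWhile_cons, if_neg hw]
      simp

-- the bridge: for negative pos, Python's text[pos+1+j] is position j of the wrapped view pvWrap
lemma pv_wrap_get (s : List Char) (pos : Int) (hneg : pos < 0) (hpre : -(s.length : Int) ≤ pos)
    (j : Nat) (hj : pos + 1 + (j : Int) < (s.length : Int)) :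
    PySem.List.pyGet? s (pos + 1 + (j : Int)) =
      (s.drop ((s.length : Int) + pos + 1).toNat ++ s)[j]? := by
  have hd : ((((s.length : Int) + pos + 1).toNat : Int)) = (s.length : Int) + pos + 1 := by omega
  set d := ((s.length : Int) + pos + 1).toNat with hdd
  have hdl : d ≤ s.length := by omega
  by_cases hc : pos + 1 + (j : Int) < 0
  · have hjlt : j < s.length - d := by omega
    rw [List.getElem?_append_left (by simp only [List.length_drop]; omega : j < (s.drop d).length)]
    rw [List.getElem?_drop]
    have hpre2 : -(s.length : Int) ≤ pos + 1 + (j : Int) := by omega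
    simp only [PySem.List.pyGet?, PySem.List.pyIdx?, not_le.mpr hc]
    rw [if_neg (by decide : ¬ False), if_pos hpre2]
    simp only [Option.bind_some]
    congr 1
    omega
  · push_neg at hc
    rw [List.getElem?_append_right (by simp only [List.length_drop]; omega : (s.drop d).length ≤ j)]
    simp only [PySem.List.pyGet?, PySem.List.pyIdx?]
    rw [if_pos hc, if_pos hj]
    simp only [Option.bind_some]
    congr 1
    simp only [List.length_drop]
    omega

lemma pv_wrap_get2 (text : String) (pos : Int) (hneg : pos < 0)
    (hpre : -(text.toList.length : Int) ≤ pos) (j : Nat)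
    (hj : pos + 1 + (j : Int) < (text.toList.length : Int)) :
    PySem.List.pyGet? text.toList (pos + 1 + (j : Int)) = (pvWrap text pos)[j]? :=
  pv_wrap_get text.toList pos hneg hpre j hj

lemma pv_take1_eq (m : List Char) (a : Char) : m.take 1 = [a] ↔ m[0]? = some a := by
  cases m <;> simp

lemma pv_take2_eq (m : List Char) (a b : Char) :
    m.take 2 = [a, b] ↔ m[0]? = some a ∧ m[1]? = some b := by
  match m with
  | [] => simp
  | [x] => simp
  | x :: y :: t => simp [List.take_succ_cons, and_comm]

lemma pv_case_ge (text : String) (pos : Int) (hge : (text.toList.length : Int) ≤ pos) :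
    parse_var_ref_py text pos = parse_var_ref_py_alt text pos := by
  simp only [parse_var_ref_py, parse_var_ref_py_alt]
  rw [if_pos hge, if_neg (by rintro ⟨_, h2, _⟩; omega)]

-- A's word-run over the wrapped view: pvScanA from pos+1 lands at pos+1+pvRun
lemma pv_scan_wrap (text : String) (pos : Int) (hdom : Dom_parse_var_ref_py text pos)
    (hneg : pos < 0) (hpre : -(text.toList.length : Int) ≤ pos) :
    pvScanA text.toList (pos + 1) = pos + 1 + (pvRun text pos : Int) := by
  have hlen : 0 < text.toList.length := by omega
  have hscan0 := pv_scan_neg text.toList (-(pos + 1)).toNat (by omega) hlen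
  rw [(show -(((-(pos + 1)).toNat : Nat) : Int) = pos + 1 by omega),
    (show text.toList.length - (-(pos + 1)).toNat = ((text.toList.length : Int) + pos + 1).toNat by omega)]
    at hscan0
  rw [hscan0]
  have hdomc : ∀ c ∈ text.toList, pvDomChar c = true := by
    unfold Dom_parse_var_ref_py pvDomStr at hdom
    simp only [Bool.and_eq_true, List.all_eq_true] at hdom
    exact fun c hc => hdom.1 c hc
  unfold pvRun pvWrap
  rw [pv_tw_congr pvIsWord (fun c => c.isAlphanum || c == '_') _
    (fun c hc => pv_word_dom c (by
      rcases List.mem_append.mp hc with h | h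
      · exact hdomc c (List.mem_of_mem_drop h)
      · exact hdomc c h))]

lemma pv_case_neg (text : String) (pos : Int) (hdom : Dom_parse_var_ref_py text pos)
    (hpre : -(text.toList.length : Int) ≤ pos)
    (hneg : pos < 0) (hnd : ¬ D_parse_var_ref_py text pos) :
    parse_var_ref_py text pos = parse_var_ref_py_alt text pos := by
  have hlen : 0 < text.toList.length := by omega
  have hlt : pos < (text.toList.length : Int) := by omega
  have hidx : text.toList.length - (-pos).toNat < text.toList.length := by omega
  have hget0 := pv_pyGet_neg text.toList pos hpre hneg hidx
  simp only [parse_var_ref_py, parse_var_ref_py_alt]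
  rw [if_neg (show ¬ pos ≥ (text.toList.length : Int) from not_le.mpr hlt)]
  rw [if_neg (show ¬ (0 ≤ pos ∧ pos < (text.toList.length : Int) ∧
    PySem.List.pyGet? text.toList pos = some '$') from by rintro ⟨h0x, _, _⟩; omega)]
  simp only [hget0]
  by_cases hc0 : text.toList[text.toList.length - (-pos).toNat]'hidx = '$'
  · have hD1 : PySem.List.pyGet? text.toList pos = some '$' := by rw [hget0, hc0]
    simp only [hc0, ne_eq, not_true_eq_false, if_false]
    rw [if_neg (show ¬ pos + 1 ≥ (text.toList.length : Int) by omega)]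
    have hsne : text.toList ≠ [] := by
      intro h
      rw [h] at hlen
      simp at hlen
    have hwne : pvWrap text pos ≠ [] := by
      unfold pvWrap
      intro h
      exact hsne (List.append_eq_nil_iff.mp h).2
    have hw0 : (pvWrap text pos)[0]? = some ((pvWrap text pos).head hwne) := by
      rw [List.getElem?_eq_getElem (by
        unfold pvWrap
        simp only [List.length_append, List.length_drop]
        omega)]
      rw [List.getElem_zero_eq_head]
    have hget1 : PySem.List.pyGet? text.toList (pos + 1) = (pvWrap text pos)[0]? := by
      have := pv_wrap_get2 text pos hneg hpre 0 (by push_cast; omega)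
      rw [(show pos + 1 + ((0 : Nat) : Int) = pos + 1 by push_cast; ring)] at this
      exact this
    set c1 := (pvWrap text pos).head hwne with hc1def
    simp only [hget1, hw0]
    have hnots : ¬ ((0 < pvRun text pos ∧
        ((pvWrap text pos).drop (pvRun text pos)).take 1 ≠ ['('] ∧
        ((pvWrap text pos).drop (pvRun text pos)).take 2 ≠ [':', ':']) ∨
        (PySem.List.pyGet? text.toList (pos + 1) = some '{' ∧
         PySem.Chars.findFrom text.toList ['}'] (pos + 2) ≠ -1)) := by
      intro hx
      exact hnd ⟨hneg, hD1, hx⟩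
    obtain ⟨hnbare, hnbrace⟩ := not_or.mp hnots
    by_cases hbr : c1 = '{'
    · rw [if_pos hbr]
      have hff : PySem.Chars.findFrom text.toList ['}'] (pos + 1 + 1) = -1 := by
        have hgb : PySem.List.pyGet? text.toList (pos + 1) = some '{' := by
          rw [hget1, hw0, hbr]
        rcases pv_findFrom_cases text.toList ['}'] (pos + 2) with h | h
        · rw [(show pos + 1 + 1 = pos + 2 by ring)]; exact h
        · exact absurd ⟨hgb, by omega⟩ hnbrace
      rw [hff, if_pos (by norm_num : (-1 : Int) < 0)]
    · rw [if_neg hbr]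
      rw [pv_scan_wrap text pos hdom hneg hpre]
      by_cases hi0 : pvRun text pos = 0
      · rw [hi0]
        simp
      · rw [if_neg (show ¬ pos + 1 + ((pvRun text pos : Nat) : Int) = pos + 1 by omega)]
        have hbare' : ((pvWrap text pos).drop (pvRun text pos)).take 1 = ['('] ∨
            ((pvWrap text pos).drop (pvRun text pos)).take 2 = [':', ':'] := by
          by_contra hx
          push_neg at hx
          exact hnbare ⟨by omega, hx.1, hx.2⟩
        have hwl : ((pvWrap text pos).length : Int) = (text.toList.length : Int) - pos - 1 := by
          unfold pvWrap
          simp only [List.length_append, List.length_drop]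
          push_cast
          omega
        rcases hbare' with hpar | hcol
        · have hh := (pv_take1_eq _ '(').mp hpar
          rw [List.getElem?_drop, Nat.add_zero] at hh
          have hlt1 : pvRun text pos < (pvWrap text pos).length := by
            by_contra hx
            rw [List.getElem?_eq_none (by omega)] at hh
            simp at hh
          have hltI : ((pvRun text pos : Nat) : Int) < ((pvWrap text pos).length : Int) := by
            exact_mod_cast hlt1
          have hgete : PySem.List.pyGet? text.toList (pos + 1 + (pvRun text pos : Int)) =
              some '(' := by
            rw [pv_wrap_get2 text pos hneg hpre (pvRun text pos) (by omega), hh]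
          rw [if_pos ⟨by omega, hgete⟩]
        · have hh := (pv_take2_eq _ ':' ':').mp hcol
          rw [List.getElem?_drop, List.getElem?_drop, Nat.add_zero] at hh
          obtain ⟨hh1, hh2⟩ := hh
          have hlt2 : pvRun text pos + 1 < (pvWrap text pos).length := by
            by_contra hx
            rw [List.getElem?_eq_none (by omega)] at hh2
            simp at hh2
          have hltI : ((pvRun text pos : Nat) : Int) + 1 < ((pvWrap text pos).length : Int) := by
            exact_mod_cast hlt2
          have hgete : PySem.List.pyGet? text.toList (pos + 1 + (pvRun text pos : Int)) =
              some ':' := by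
            rw [pv_wrap_get2 text pos hneg hpre (pvRun text pos) (by omega), hh1]
          have hgete1 : PySem.List.pyGet? text.toList (pos + 1 + (pvRun text pos : Int) + 1) =
              some ':' := by
            have := pv_wrap_get2 text pos hneg hpre (pvRun text pos + 1) (by push_cast; omega)
            rw [(show pos + 1 + ((pvRun text pos + 1 : Nat) : Int) =
              pos + 1 + (pvRun text pos : Int) + 1 by push_cast; ring)] at this
            rw [this, hh2]
          rw [if_neg (by
            rintro ⟨_, hx⟩
            rw [hgete] at hx
            simp at hx)]
          rw [if_pos ⟨by omega, hgete, by omega, hgete1⟩]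
  · simp only [hc0, ne_eq, not_false_eq_true, if_true]

lemma pv_case_main (text : String) (k : Nat) (hdom : Dom_parse_var_ref_py text (k : Int))
    (hk : k < text.toList.length) :
    parse_var_ref_py text (k : Int) = parse_var_ref_py_alt text (k : Int) := by
  have hdomc : ∀ c ∈ text.toList, pvDomChar c = true := by
    unfold Dom_parse_var_ref_py pvDomStr at hdom
    simp only [Bool.and_eq_true, List.all_eq_true] at hdom
    exact fun c hc => hdom.1 c hc
  have hget : PySem.List.pyGet? text.toList (k : Int) = some (text.toList[k]'hk) := by
    rw [PySem.List.pyGet?_natCast]; exact List.getElem?_eq_getElem hk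
  simp only [parse_var_ref_py, parse_var_ref_py_alt]
  rw [if_neg (by push_neg; exact_mod_cast hk)]
  simp only [hget]
  by_cases hc0 : text.toList[k]'hk = '$'
  case neg =>
    simp only [ne_eq, hc0, not_false_eq_true, if_true]
    rw [if_neg (by rintro ⟨_, _, hx⟩; exact hc0 (by simpa using hx))]
  case pos =>
    simp only [ne_eq, hc0, not_true_eq_false, if_false]
    rw [if_pos (show 0 ≤ (k : Int) ∧ (k : Int) < (text.toList.length : Int) ∧ True from
      ⟨Int.natCast_nonneg k, by exact_mod_cast hk, trivial⟩)]
    simp only [Int.toNat_natCast]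
    have hdropk : text.toList.drop k = '$' :: text.toList.drop (k + 1) := by
      rw [List.drop_eq_getElem_cons hk, hc0]
    by_cases hk1 : k + 1 < text.toList.length
    case neg =>
      rw [if_pos (show (k : Int) + 1 ≥ (text.toList.length : Int) by omega)]
      have hdrop1 : text.toList.drop (k + 1) = [] := List.drop_eq_nil_of_le (by omega)
      simp [pvBracedMatch, pvBareMatch, hdropk, hdrop1]
    case pos =>
      rw [if_neg (show ¬ (k : Int) + 1 ≥ (text.toList.length : Int) by omega)]
      have hget1 : PySem.List.pyGet? text.toList ((k : Int) + 1) = some (text.toList[k + 1]'hk1) := by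
        rw [(by push_cast; ring : (k : Int) + 1 = ((k + 1 : Nat) : Int)), PySem.List.pyGet?_natCast]
        exact List.getElem?_eq_getElem hk1
      simp only [hget1]
      have hdropk1 : text.toList.drop (k + 1) = text.toList[k + 1]'hk1 :: text.toList.drop (k + 2) :=
        List.drop_eq_getElem_cons hk1
      by_cases hbr : text.toList[k + 1]'hk1 = '{'
      · -- braced form
        rw [if_pos hbr]
        have harg : (k : Int) + 1 + 1 = ((k + 2 : Nat) : Int) := by push_cast; ring
        rw [harg, PySem.Chars.findFrom_natCast text.toList ['}'] (k + 2) (by omega)]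
        rw [pv_find_brace (text.toList.drop (k + 2))]
        by_cases hmem : ('}' : Char) ∈ text.toList.drop (k + 2)
        · rw [if_pos hmem]
          rw [if_neg (by omega :
            ¬ ((((text.toList.drop (k + 2)).takeWhile (fun c => c != '}')).length : Int) = -1))]
          rw [if_neg (by omega : ¬ (((k + 2 : Nat) : Int) +
            (((text.toList.drop (k + 2)).takeWhile (fun c => c != '}')).length : Int) < 0))]
          have hbm : pvBracedMatch text.toList k =
              some (k + 2 + ((text.toList.drop (k + 2)).takeWhile (fun c => c != '}')).length + 1,
                (text.toList.drop (k + 2)).takeWhile (fun c => c != '}')) := by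
            unfold pvBracedMatch
            rw [if_pos (by rw [hdropk, hdropk1, hbr]; rfl)]
            rw [if_pos ((pv_tw_lt_iff _).mpr hmem)]
          simp only [hbm]
          simp only [Prod.mk.injEq]
          refine ⟨by push_cast; ring, ?_⟩
          have hcast2 : ((k + 2 : Nat) : Int) +
              (((text.toList.drop (k + 2)).takeWhile (fun c => c != '}')).length : Int) =
              ((k + 2 + ((text.toList.drop (k + 2)).takeWhile (fun c => c != '}')).length : Nat) : Int) := by
            push_cast; ring
          rw [hcast2, PySem.List.slice_natCast]
          rw [(by omega : k + 2 + ((text.toList.drop (k + 2)).takeWhile (fun c => c != '}')).length - (k + 2)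
            = ((text.toList.drop (k + 2)).takeWhile (fun c => c != '}')).length)]
          rw [pv_tw_take]
        · rw [if_neg hmem, if_pos rfl, if_pos (by norm_num : (-1 : Int) < 0)]
          have hbm : pvBracedMatch text.toList k = none := by
            unfold pvBracedMatch
            rw [if_pos (by rw [hdropk, hdropk1, hbr]; rfl)]
            rw [if_neg (fun h => hmem ((pv_tw_lt_iff _).mp h))]
          have hbm2 : pvBareMatch text.toList k = none := by
            unfold pvBareMatch
            rw [if_pos (by rw [hdropk]; rfl)]
            rw [hdropk1, hbr]
            rw [if_pos (by simp [(by decide : pvAsciiWord '{' = false)])]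
          simp only [hbm, hbm2]
      · -- bare form
        rw [if_neg hbr]
        have hscan : pvScanA text.toList ((k : Int) + 1) =
            ((k : Int) + 1) + ((text.toList.drop (k + 1)).takeWhile pvIsWord).length := by
          rw [(by push_cast; ring : (k : Int) + 1 = ((k + 1 : Nat) : Int)),
            pv_scanA text.toList (k + 1) (by omega)]
        have hwords : (text.toList.drop (k + 1)).takeWhile pvIsWord =
            (text.toList.drop (k + 1)).takeWhile pvAsciiWord :=
          pv_tw_congr _ _ _ (fun c hc => pv_word_ascii c (hdomc c (List.mem_of_mem_drop hc)))
        rw [hwords] at hscan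
        simp only [hscan]
        have hbm : pvBracedMatch text.toList k = none := by
          unfold pvBracedMatch
          rw [hdropk, hdropk1]
          refine if_neg ?_
          intro hx
          have hx' : ['$', text.toList[k + 1]'hk1] = ['$', '{'] := hx
          exact hbr (by simpa using hx')
        simp only [hbm]
        by_cases hw0 : ((text.toList.drop (k + 1)).takeWhile pvAsciiWord).length = 0
        · have hbm2 : pvBareMatch text.toList k = none := by
            unfold pvBareMatch
            rw [if_pos (by rw [hdropk]; rfl), if_pos hw0]
          simp only [hbm2, hw0]
          rw [if_pos (by push_cast; ring)]
        · have hbm2 : pvBareMatch text.toList k =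
              some (k + 1 + ((text.toList.drop (k + 1)).takeWhile pvAsciiWord).length,
                (text.toList.drop (k + 1)).takeWhile pvAsciiWord) := by
            unfold pvBareMatch
            rw [if_pos (by rw [hdropk]; rfl), if_neg hw0]
          simp only [hbm2]
          rw [if_neg (by omega : ¬ ((k : Int) + 1 +
            (((text.toList.drop (k + 1)).takeWhile pvAsciiWord).length : Int) = (k : Int) + 1))]
          have hcast : (k : Int) + 1 + (((text.toList.drop (k + 1)).takeWhile pvAsciiWord).length : Int) =
              ((k + 1 + ((text.toList.drop (k + 1)).takeWhile pvAsciiWord).length : Nat) : Int) := by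
            push_cast; ring
          rw [hcast]
          -- abbreviate the follower index
          generalize hmdef : k + 1 + ((text.toList.drop (k + 1)).takeWhile pvAsciiWord).length = m
          have hkm : k + 1 ≤ m := by omega
          have hsl1 : PySem.List.slice text.toList (some ((m : Nat) : Int)) (some (((m : Nat) : Int) + 1)) =
              (text.toList.drop m).take 1 := by
            rw [(by push_cast; ring : ((m : Nat) : Int) + 1 = ((m + 1 : Nat) : Int)),
              PySem.List.slice_natCast]
            congr 1; omega
          have hsl2 : PySem.List.slice text.toList (some ((m : Nat) : Int)) (some (((m : Nat) : Int) + 2)) =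
              (text.toList.drop m).take 2 := by
            rw [(by push_cast; ring : ((m : Nat) : Int) + 2 = ((m + 2 : Nat) : Int)),
              PySem.List.slice_natCast]
            congr 1; omega
          have hslice : PySem.List.slice text.toList (some ((k : Int) + 1)) (some ((m : Nat) : Int)) =
              (text.toList.drop (k + 1)).takeWhile pvAsciiWord := by
            rw [(by push_cast; ring : (k : Int) + 1 = ((k + 1 : Nat) : Int)), PySem.List.slice_natCast]
            rw [(by omega : m - (k + 1) = ((text.toList.drop (k + 1)).takeWhile pvAsciiWord).length)]
            exact pv_tw_take _ _
          by_cases hml : m < text.toList.length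
          · have hgetm : PySem.List.pyGet? text.toList ((m : Nat) : Int) = some (text.toList[m]'hml) := by
              rw [PySem.List.pyGet?_natCast]; exact List.getElem?_eq_getElem hml
            have hdropm : text.toList.drop m = text.toList[m]'hml :: text.toList.drop (m + 1) :=
              List.drop_eq_getElem_cons hml
            by_cases hpar : text.toList[m]'hml = '('
            · rw [if_pos ⟨by exact_mod_cast hml, by rw [hgetm, hpar]⟩]
              rw [if_neg (by rintro ⟨h1, _⟩; exact h1 (by rw [hsl1, hdropm, hpar]; rfl))]
            · by_cases hcol : (text.toList.drop m).take 2 = [':', ':']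
              · have hm1 : m + 1 < text.toList.length := by
                  by_contra hx
                  rw [hdropm, List.drop_eq_nil_of_le (by omega)] at hcol
                  simp at hcol
                have hdropm1 : text.toList.drop (m + 1) =
                    text.toList[m + 1]'hm1 :: text.toList.drop (m + 2) :=
                  List.drop_eq_getElem_cons hm1
                have hcc : text.toList[m]'hml = ':' ∧ text.toList[m + 1]'hm1 = ':' := by
                  rw [hdropm, hdropm1] at hcol
                  have hcc' : [text.toList[m]'hml, text.toList[m + 1]'hm1] = [':', ':'] := hcol
                  simpa using hcc'
                have hgetm1 : PySem.List.pyGet? text.toList (((m : Nat) : Int) + 1) =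
                    some (text.toList[m + 1]'hm1) := by
                  rw [(by push_cast; ring : ((m : Nat) : Int) + 1 = ((m + 1 : Nat) : Int)),
                    PySem.List.pyGet?_natCast]
                  exact List.getElem?_eq_getElem hm1
                rw [if_neg (by rintro ⟨_, hx⟩; rw [hgetm] at hx; exact hpar (by simpa using hx))]
                rw [if_pos ⟨by exact_mod_cast hml, by rw [hgetm, hcc.1],
                  by exact_mod_cast hm1, by rw [hgetm1, hcc.2]⟩]
                rw [if_neg (by rintro ⟨_, h2⟩; exact h2 (by rw [hsl2]; exact hcol))]
              · rw [if_neg (by rintro ⟨_, hx⟩; rw [hgetm] at hx; exact hpar (by simpa using hx))]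
                rw [if_neg (by
                  rintro ⟨_, hx2, hx3, hx4⟩
                  apply hcol
                  have hm1 : m + 1 < text.toList.length := by exact_mod_cast hx3
                  have hgetm1 : PySem.List.pyGet? text.toList (((m : Nat) : Int) + 1) =
                      some (text.toList[m + 1]'hm1) := by
                    rw [(by push_cast; ring : ((m : Nat) : Int) + 1 = ((m + 1 : Nat) : Int)),
                      PySem.List.pyGet?_natCast]
                    exact List.getElem?_eq_getElem hm1
                  have h1 : text.toList[m]'hml = ':' := by rw [hgetm] at hx2; simpa using hx2
                  have h2 : text.toList[m + 1]'hm1 = ':' := by rw [hgetm1] at hx4; simpa using hx4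
                  rw [hdropm, List.drop_eq_getElem_cons hm1]
                  simp [h1, h2])]
                rw [if_pos ⟨by
                  rw [hsl1]
                  intro hx
                  rw [hdropm] at hx
                  have hx' : [text.toList[m]'hml] = ['('] := hx
                  exact hpar (by simpa using hx'),
                            by rw [hsl2]; exact hcol⟩]
                rw [hslice]
          · have hdropm : text.toList.drop m = [] := List.drop_eq_nil_of_le (by omega)
            rw [if_neg (by rintro ⟨hx, _⟩; omega)]
            rw [if_neg (by rintro ⟨hx, _⟩; omega)]
            rw [if_pos ⟨by rw [hsl1, hdropm]; simp, by rw [hsl2, hdropm]; simp⟩]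
            rw [hslice]

lemma pv_D_some (text : String) (pos : Int) (hdom : Dom_parse_var_ref_py text pos)
    (hD : D_parse_var_ref_py text pos) :
    (parse_var_ref_py text pos).2 ≠ none := by
  obtain ⟨hneg, hD1, hsucc⟩ := hD
  have hpre : -(text.toList.length : Int) ≤ pos := by
    by_contra hx
    push_neg at hx
    have hnone : PySem.List.pyGet? text.toList pos = none := by
      simp only [PySem.List.pyGet?, PySem.List.pyIdx?]
      rw [if_neg (by omega : ¬ (0 : Int) ≤ pos),
        if_neg (by omega : ¬ -(text.toList.length : Int) ≤ pos)]
      rfl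
    rw [hnone] at hD1
    simp at hD1
  have hlen : 0 < text.toList.length := by omega
  simp only [parse_var_ref_py]
  rw [if_neg (show ¬ pos ≥ (text.toList.length : Int) by omega)]
  simp only [hD1]
  simp only [ne_eq, not_true_eq_false, if_false]
  rw [if_neg (show ¬ pos + 1 ≥ (text.toList.length : Int) by omega)]
  have hget1 : PySem.List.pyGet? text.toList (pos + 1) = (pvWrap text pos)[0]? := by
    have := pv_wrap_get2 text pos hneg hpre 0 (by push_cast; omega)
    rw [(show pos + 1 + ((0 : Nat) : Int) = pos + 1 by push_cast; ring)] at this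
    exact this
  rcases hsucc with ⟨hi0, ht1, ht2⟩ | ⟨hgb, hff⟩
  · -- bare success
    have hw0 : ∃ c, (pvWrap text pos)[0]? = some c ∧ (c.isAlphanum || c == '_') = true := by
      unfold pvRun at hi0
      cases hw : pvWrap text pos with
      | nil => rw [hw] at hi0; simp at hi0
      | cons a t =>
        rw [hw, List.takeWhile_cons] at hi0
        by_cases ha : (a.isAlphanum || a == '_') = true
        · exact ⟨a, by simp [hw], ha⟩
        · rw [if_neg ha] at hi0; simp at hi0
    obtain ⟨c1, hc1, hc1w⟩ := hw0
    simp only [hget1, hc1]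
    have hbr : ¬ c1 = '{' := by
      intro h
      rw [h] at hc1w
      exact Bool.noConfusion ((by decide : (('{' : Char).isAlphanum || '{' == '_') = false) ▸ hc1w)
    rw [if_neg hbr]
    rw [pv_scan_wrap text pos hdom hneg hpre]
    rw [if_neg (show ¬ pos + 1 + ((pvRun text pos : Nat) : Int) = pos + 1 by
      have : 0 < pvRun text pos := hi0
      omega)]
    have hnopar : ¬ (pos + 1 + ((pvRun text pos : Nat) : Int) < (text.toList.length : Int) ∧
        PySem.List.pyGet? text.toList (pos + 1 + (pvRun text pos : Int)) = some '(') := by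
      rintro ⟨hlt1, hx⟩
      apply ht1
      rw [pv_wrap_get2 text pos hneg hpre (pvRun text pos) hlt1] at hx
      rw [(pv_take1_eq _ '('), List.getElem?_drop, Nat.add_zero]
      exact hx
    have hnocol : ¬ (pos + 1 + ((pvRun text pos : Nat) : Int) < (text.toList.length : Int) ∧
        PySem.List.pyGet? text.toList (pos + 1 + (pvRun text pos : Int)) = some ':' ∧
        pos + 1 + ((pvRun text pos : Nat) : Int) + 1 < (text.toList.length : Int) ∧
        PySem.List.pyGet? text.toList (pos + 1 + (pvRun text pos : Int) + 1) = some ':') := by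
      rintro ⟨hlt1, hx1, hlt2, hx2⟩
      apply ht2
      rw [pv_wrap_get2 text pos hneg hpre (pvRun text pos) hlt1] at hx1
      rw [(show pos + 1 + (pvRun text pos : Int) + 1 =
        pos + 1 + ((pvRun text pos + 1 : Nat) : Int) by push_cast; ring)] at hx2
      rw [pv_wrap_get2 text pos hneg hpre (pvRun text pos + 1) (by push_cast; omega)] at hx2
      rw [(pv_take2_eq _ ':' ':'), List.getElem?_drop, List.getElem?_drop, Nat.add_zero]
      exact ⟨hx1, hx2⟩
    rw [if_neg hnopar, if_neg hnocol]
    simp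
  · -- braced success
    simp only [hgb]
    rw [if_pos trivial]
    have hnn : 0 ≤ PySem.Chars.findFrom text.toList ['}'] (pos + 1 + 1) := by
      rw [(show pos + 1 + 1 = pos + 2 by ring)]
      exact pv_findFrom_nonneg _ _ _ hff
    rw [if_neg (show ¬ PySem.Chars.findFrom text.toList ['}'] (pos + 1 + 1) < 0 by omega)]
    simp

-- ===== VERDICT (by name: the statement is the Claim_ definition above) =====
theorem parse_var_ref_py_spec : Claim_unchanged_parse_var_ref_py := by
  intro text pos hdom hpre
  unfold Spec_parse_var_ref_py
  intro hnd
  unfold Pre_parse_var_ref_py at hpre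
  by_cases hge : (text.toList.length : Int) ≤ pos
  · exact pv_case_ge text pos hge
  · push_neg at hge
    by_cases hneg : pos < 0
    · exact pv_case_neg text pos hdom hpre hneg hnd
    · push_neg at hneg
      obtain ⟨k, rfl⟩ : ∃ k : Nat, pos = (k : Int) := ⟨pos.toNat, (Int.toNat_of_nonneg hneg).symm⟩
      exact pv_case_main text k hdom (by exact_mod_cast hge)

set_option maxRecDepth 8192 in
theorem parse_var_ref_py_changed : Claim_changed_parse_var_ref_py := by
  unfold Claim_changed_parse_var_ref_py; decide

theorem parse_var_ref_py_tight : Claim_exact_parse_var_ref_py := by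
  intro text pos hdom hpre hD
  have h2 := pv_D_some text pos hdom hD
  have hneg : pos < 0 := hD.1
  intro heq
  apply h2
  rw [heq]
  unfold parse_var_ref_py_alt
  rw [if_neg (by rintro ⟨h0, _, _⟩; omega)]
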